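-- pv_equiv track=rewrite | github.com/pankajkalania/efscrapper | efscrapper/efscrapper/spiders/mainspider.py | return_ordered_ext_keys
-- ===== SOURCE A (Python) =====
-- def return_ordered_ext_keys(ext_codes):
--     output_ext_key_order = []
--     if 'block' in ext_codes.keys():
--         output_ext_key_order.append('block')
--     if 'block1' in ext_codes.keys():
--         output_ext_key_order.append('block1')
--     if 'iterable' in ext_codes.keys():
--         output_ext_key_order.append('iterable')
--     for key in ext_codes.keys():
--         if key not in output_ext_key_order:
--             output_ext_key_order.append(key)
--     return output_ext_key_order
-- ===== SOURCE B (Python) =====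
-- def return_ordered_ext_keys(ext_codes):
--     rank = {'block': 0, 'block1': 1, 'iterable': 2}
--     return sorted(ext_codes, key=lambda k: rank.get(k, 3))
-- ===== Notes on version B (the rewrite author's own statement) =====
-- stated objective: simpler
-- what changed: Replaces the three membership checks plus an append-if-absent scan loop with a single stable sort of the keys under a rank function (priority keys rank 0/1/2, everything else rank 3), relying on sort stability to keep insertion order among non-priority keys.
import Mathlib
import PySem

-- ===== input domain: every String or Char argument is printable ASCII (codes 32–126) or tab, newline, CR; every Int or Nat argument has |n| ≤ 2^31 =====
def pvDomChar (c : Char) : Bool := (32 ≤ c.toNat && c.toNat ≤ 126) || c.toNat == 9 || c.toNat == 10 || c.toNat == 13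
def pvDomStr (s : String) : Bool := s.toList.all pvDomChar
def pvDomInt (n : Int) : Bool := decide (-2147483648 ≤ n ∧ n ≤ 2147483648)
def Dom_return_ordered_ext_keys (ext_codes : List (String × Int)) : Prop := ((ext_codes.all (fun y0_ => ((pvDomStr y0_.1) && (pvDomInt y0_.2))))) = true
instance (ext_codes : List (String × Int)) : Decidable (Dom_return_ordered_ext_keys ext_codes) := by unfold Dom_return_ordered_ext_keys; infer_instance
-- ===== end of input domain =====

-- B replaces A's three membership checks + append-if-absent scan by one stable sort of the
-- keys under a priority-rank function (objective: simpler; same return value).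


-- ===== PORT A =====
def return_ordered_ext_keys (ext_codes : List (String × Int)) : List String :=
  let ks := (PySem.Dict.ofList ext_codes).keys
  let out0 : List String := []
  let out1 := if ks.contains "block" then out0 ++ ["block"] else out0
  let out2 := if ks.contains "block1" then out1 ++ ["block1"] else out1
  let out3 := if ks.contains "iterable" then out2 ++ ["iterable"] else out2
  ks.foldl (fun acc key => if acc.contains key then acc else acc ++ [key]) out3

-- ===== PORT B =====
def pvRank : PySem.Dict String Int :=
  PySem.Dict.ofList [("block", 0), ("block1", 1), ("iterable", 2)]

def return_ordered_ext_keys_alt (ext_codes : List (String × Int)) : List String :=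
  PySem.List.sorted (PySem.Dict.ofList ext_codes).keys (fun k => pvRank.getD k 3) false

-- ===== PRECONDITION & SPEC =====
def Spec_return_ordered_ext_keys (ext_codes : List (String × Int)) (out : List String) : Prop := out = return_ordered_ext_keys_alt ext_codes
instance (ext_codes : List (String × Int)) (out : List String) : Decidable (Spec_return_ordered_ext_keys ext_codes out) := by unfold Spec_return_ordered_ext_keys; infer_instance

-- ===== CLAIM (what is proved, stated in full; the proofs are below) =====
def Claim_equal_return_ordered_ext_keys : Prop := ∀ (ext_codes : List (String × Int)), Dom_return_ordered_ext_keys ext_codes → Spec_return_ordered_ext_keys ext_codes (return_ordered_ext_keys ext_codes)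

-- ===== LEMMAS AND PROOFS =====

-- the rank function, in closed form
theorem pvRank_eq : pvRank = ((PySem.Dict.empty.insert "block" (0:Int)).insert "block1" 1).insert "iterable" 2 := by
  decide

theorem pvRank_getD (k : String) :
    pvRank.getD k 3 = (if k = "block" then 0 else if k = "block1" then 1 else if k = "iterable" then 2 else (3 : Int)) := by
  by_cases h1 : k = "block"
  · subst h1; decide
  · by_cases h2 : k = "block1"
    · subst h2; decide
    · by_cases h3 : k = "iterable"
      · subst h3; decide
      · rw [if_neg h1, if_neg h2, if_neg h3, pvRank_eq]
        simp [PySem.Dict.getD_insert, h1, h2, h3, PySem.Dict.getD_empty]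

-- insertBy skips a prefix it does not go before
theorem insertBy_append_left (b : String → String → Bool) (x : String) (p s : List String)
    (hp : ∀ y ∈ p, b x y = false) :
    PySem.List.insertBy b x (p ++ s) = p ++ PySem.List.insertBy b x s := by
  induction p with
  | nil => rfl
  | cons y ys ih =>
      simp only [List.cons_append, PySem.List.insertBy, hp y (by simp)]
      simp only [Bool.false_eq_true, if_false, List.cons.injEq, true_and]
      exact ih (fun z hz => hp z (by simp [hz]))

-- insertBy goes straight to the front of a list it goes before everywhere
theorem insertBy_all (b : String → String → Bool) (x : String) (s : List String)
    (hs : ∀ y ∈ s, b x y = true) :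
    PySem.List.insertBy b x s = x :: s := by
  cases s with
  | nil => rfl
  | cons y ys => simp [PySem.List.insertBy, hs y (by simp)]

-- insertBy lands between a prefix it fails and a suffix it beats
theorem insertBy_mid (b : String → String → Bool) (x : String) (p s : List String)
    (hp : ∀ y ∈ p, b x y = false) (hs : ∀ y ∈ s, b x y = true) :
    PySem.List.insertBy b x (p ++ s) = p ++ x :: s := by
  rw [insertBy_append_left b x p s hp, insertBy_all b x s hs]

-- stable insertion sort under a 4-valued rank = the four rank classes concatenated, each in order
theorem foldl_insertBy_rank (f : String → Int) (hf : ∀ k, f k = 0 ∨ f k = 1 ∨ f k = 2 ∨ f k = 3)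
    (ks a0 a1 a2 a3 : List String)
    (h0 : ∀ y ∈ a0, f y = 0) (h1 : ∀ y ∈ a1, f y = 1) (h2 : ∀ y ∈ a2, f y = 2) (h3 : ∀ y ∈ a3, f y = 3) :
    ks.foldl (fun acc x => PySem.List.insertBy (fun a b => decide (f a < f b)) x acc)
        (a0 ++ a1 ++ a2 ++ a3)
      = (a0 ++ ks.filter (fun k => f k == 0)) ++ (a1 ++ ks.filter (fun k => f k == 1))
        ++ (a2 ++ ks.filter (fun k => f k == 2)) ++ (a3 ++ ks.filter (fun k => f k == 3)) := by
  induction ks generalizing a0 a1 a2 a3 with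
  | nil => simp
  | cons x ks ih =>
      simp only [List.foldl_cons, List.filter_cons]
      rcases hf x with h | h | h | h
      · have hins : PySem.List.insertBy (fun a b => decide (f a < f b)) x (a0 ++ a1 ++ a2 ++ a3)
            = (a0 ++ [x]) ++ a1 ++ a2 ++ a3 := by
          have := insertBy_mid (fun a b => decide (f a < f b)) x a0 (a1 ++ a2 ++ a3)
            (by intro y hy; simp [h, h0 y hy])
            (by intro y hy
                rcases (List.mem_append.mp hy) with hy | hy
                · rcases List.mem_append.mp hy with hy | hy
                  · simp [h, h1 y hy]
                  · simp [h, h2 y hy]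
                · simp [h, h3 y hy])
          simp only [List.append_assoc] at this ⊢
          simp [this]
        rw [hins, ih (a0 ++ [x]) a1 a2 a3
              (by intro y hy; rcases List.mem_append.mp hy with hy | hy
                  · exact h0 y hy
                  · simp at hy; subst hy; exact h) h1 h2 h3]
        simp [h, List.append_assoc]
      · have hins : PySem.List.insertBy (fun a b => decide (f a < f b)) x (a0 ++ a1 ++ a2 ++ a3)
            = a0 ++ (a1 ++ [x]) ++ a2 ++ a3 := by
          have := insertBy_mid (fun a b => decide (f a < f b)) x (a0 ++ a1) (a2 ++ a3)
            (by intro y hy; rcases List.mem_append.mp hy with hy | hy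
                · simp [h, h0 y hy]
                · simp [h, h1 y hy])
            (by intro y hy; rcases List.mem_append.mp hy with hy | hy
                · simp [h, h2 y hy]
                · simp [h, h3 y hy])
          simp only [List.append_assoc] at this ⊢
          simp [this]
        rw [hins, ih a0 (a1 ++ [x]) a2 a3 h0
              (by intro y hy; rcases List.mem_append.mp hy with hy | hy
                  · exact h1 y hy
                  · simp at hy; subst hy; exact h) h2 h3]
        simp [h, List.append_assoc]
      · have hins : PySem.List.insertBy (fun a b => decide (f a < f b)) x (a0 ++ a1 ++ a2 ++ a3)
            = a0 ++ a1 ++ (a2 ++ [x]) ++ a3 := by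
          have := insertBy_mid (fun a b => decide (f a < f b)) x (a0 ++ a1 ++ a2) a3
            (by intro y hy
                rcases List.mem_append.mp hy with hy | hy
                · rcases List.mem_append.mp hy with hy | hy
                  · simp [h, h0 y hy]
                  · simp [h, h1 y hy]
                · simp [h, h2 y hy])
            (by intro y hy; simp [h, h3 y hy])
          simp only [List.append_assoc] at this ⊢
          simp [this]
        rw [hins, ih a0 a1 (a2 ++ [x]) a3 h0 h1
              (by intro y hy; rcases List.mem_append.mp hy with hy | hy
                  · exact h2 y hy
                  · simp at hy; subst hy; exact h) h3]
        simp [h, List.append_assoc]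
      · have hins : PySem.List.insertBy (fun a b => decide (f a < f b)) x (a0 ++ a1 ++ a2 ++ a3)
            = a0 ++ a1 ++ a2 ++ (a3 ++ [x]) := by
          have := insertBy_mid (fun a b => decide (f a < f b)) x (a0 ++ a1 ++ a2 ++ a3) []
            (by intro y hy
                rcases List.mem_append.mp hy with hy | hy
                · rcases List.mem_append.mp hy with hy | hy
                  · rcases List.mem_append.mp hy with hy | hy
                    · simp [h, h0 y hy]
                    · simp [h, h1 y hy]
                  · simp [h, h2 y hy]
                · simp [h, h3 y hy])
            (by intro y hy; simp at hy)
          simp only [List.append_assoc, List.append_nil] at this ⊢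
          simp [this]
        rw [hins, ih a0 a1 a2 (a3 ++ [x]) h0 h1 h2
              (by intro y hy; rcases List.mem_append.mp hy with hy | hy
                  · exact h3 y hy
                  · simp at hy; subst hy; exact h)]
        simp [h, List.append_assoc]

-- A's dedup loop over a Nodup list appends exactly the keys missing from the start value
theorem foldl_dedup_loop (ks : List String) (hnd : ks.Nodup) (out : List String) :
    ks.foldl (fun acc key => if acc.contains key then acc else acc ++ [key]) out
      = out ++ ks.filter (fun k => !out.contains k) := by
  induction ks generalizing out with
  | nil => simp
  | cons k ks ih =>
      rcases List.nodup_cons.mp hnd with ⟨hk, hnd'⟩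
      cases hmem : out.contains k with
      | true =>
          simp only [List.foldl_cons, hmem, if_true, List.filter_cons, Bool.not_true,
            Bool.false_eq_true, if_false]
          exact ih hnd' out
      | false =>
          simp only [List.foldl_cons, hmem, Bool.false_eq_true, if_false, List.filter_cons,
            Bool.not_false, if_true]
          rw [ih hnd' (out ++ [k])]
          have hcong : ks.filter (fun j => !(out ++ [k]).contains j) = ks.filter (fun j => !out.contains j) := by
            apply List.filter_congr
            intro j hj
            have : j ≠ k := fun h => hk (h ▸ hj)
            simp [List.contains_append, this]
          rw [hcong]
          simp [List.append_assoc]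

-- filtering a Nodup list for one value
theorem filter_eq_of_nodup (ks : List String) (hnd : ks.Nodup) (a : String) :
    ks.filter (fun k => k == a) = if ks.contains a then [a] else [] := by
  induction ks with
  | nil => simp
  | cons k ks ih =>
      rcases List.nodup_cons.mp hnd with ⟨hk, hnd'⟩
      simp only [List.filter_cons, List.contains_cons]
      by_cases hka : k = a
      · subst hka
        have h1 : List.filter (fun j => j == k) ks = [] :=
          List.filter_eq_nil_iff.mpr (fun j hj => by
            simp only [beq_iff_eq]; rintro rfl; exact hk hj)
        simp [h1]
      · have hbk : (k == a) = false := beq_eq_false_iff_ne.mpr hka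
        have hak : (a == k) = false := beq_eq_false_iff_ne.mpr (Ne.symm hka)
        simp [hbk, hak, ih hnd']

-- ===== VERDICT (by name: the statement is the Claim_ definition above) =====
-- one-value filter lemmas for the three priority keys
theorem filter_rank0 (ks : List String) (hnd : ks.Nodup) :
    ks.filter (fun k => pvRank.getD k 3 == 0) = if ks.contains "block" then ["block"] else [] := by
  have hfun : (fun k : String => pvRank.getD k 3 == 0) = (fun k => k == "block") := by
    funext k; rw [pvRank_getD]
    by_cases h1 : k = "block"
    · subst h1; decide
    · simp only [if_neg h1]
      by_cases h2 : k = "block1"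
      · subst h2; decide
      · simp only [if_neg h2]
        by_cases h3 : k = "iterable"
        · subst h3; decide
        · simp only [if_neg h3]; simp [h1]
  rw [hfun]; exact filter_eq_of_nodup ks hnd "block"

theorem filter_rank1 (ks : List String) (hnd : ks.Nodup) :
    ks.filter (fun k => pvRank.getD k 3 == 1) = if ks.contains "block1" then ["block1"] else [] := by
  have hfun : (fun k : String => pvRank.getD k 3 == 1) = (fun k => k == "block1") := by
    funext k; rw [pvRank_getD]
    by_cases h1 : k = "block"
    · subst h1; decide
    · simp only [if_neg h1]
      by_cases h2 : k = "block1"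
      · subst h2; decide
      · simp only [if_neg h2]
        by_cases h3 : k = "iterable"
        · subst h3; decide
        · simp only [if_neg h3]; simp [h2]
  rw [hfun]; exact filter_eq_of_nodup ks hnd "block1"

theorem filter_rank2 (ks : List String) (hnd : ks.Nodup) :
    ks.filter (fun k => pvRank.getD k 3 == 2) = if ks.contains "iterable" then ["iterable"] else [] := by
  have hfun : (fun k : String => pvRank.getD k 3 == 2) = (fun k => k == "iterable") := by
    funext k; rw [pvRank_getD]
    by_cases h1 : k = "block"
    · subst h1; decide
    · simp only [if_neg h1]
      by_cases h2 : k = "block1"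
      · subst h2; decide
      · simp only [if_neg h2]
        by_cases h3 : k = "iterable"
        · subst h3; decide
        · simp only [if_neg h3]; simp [h3]
  rw [hfun]; exact filter_eq_of_nodup ks hnd "iterable"

-- the trailing filter of A's loop is exactly the rank-3 class
theorem rest_congr (ks : List String) (out : List String)
    (hb : ("block" ∈ out ↔ "block" ∈ ks))
    (hb1 : ("block1" ∈ out ↔ "block1" ∈ ks))
    (hit : ("iterable" ∈ out ↔ "iterable" ∈ ks))
    (hsub : ∀ k ∈ out, k = "block" ∨ k = "block1" ∨ k = "iterable") :
    ks.filter (fun k => !out.contains k) = ks.filter (fun k => pvRank.getD k 3 == 3) := by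
  apply List.filter_congr
  intro k hk
  rw [pvRank_getD]
  by_cases h1 : k = "block"
  · subst h1; simp [List.contains_eq_mem, hb.mpr hk]
  · by_cases h2 : k = "block1"
    · subst h2; simp [h1, List.contains_eq_mem, hb1.mpr hk]
    · by_cases h3 : k = "iterable"
      · subst h3; simp [h1, h2, List.contains_eq_mem, hit.mpr hk]
      · have hno : k ∉ out := by
          intro hko
          rcases hsub k hko with h | h | h
          · exact h1 h
          · exact h2 h
          · exact h3 h
        simp [h1, h2, h3, List.contains_eq_mem, hno]

-- the whole equality, for any Nodup key list
theorem main_equality (ks : List String) (hnd : ks.Nodup) :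
    (let out0 : List String := []
     let out1 := if ks.contains "block" then out0 ++ ["block"] else out0
     let out2 := if ks.contains "block1" then out1 ++ ["block1"] else out1
     let out3 := if ks.contains "iterable" then out2 ++ ["iterable"] else out2
     ks.foldl (fun acc key => if acc.contains key then acc else acc ++ [key]) out3)
    = PySem.List.sorted ks (fun k => pvRank.getD k 3) false := by
  simp only []
  have hf : ∀ k : String, pvRank.getD k 3 = 0 ∨ pvRank.getD k 3 = 1 ∨ pvRank.getD k 3 = 2 ∨ pvRank.getD k 3 = 3 := by
    intro k; rw [pvRank_getD]; split_ifs <;> simp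
  have hB := foldl_insertBy_rank (fun k => pvRank.getD k 3) hf ks [] [] [] []
    (by simp) (by simp) (by simp) (by simp)
  simp only [List.nil_append] at hB
  rw [PySem.List.sorted_eq_foldl_insertBy, hB, foldl_dedup_loop ks hnd,
      filter_rank0 ks hnd, filter_rank1 ks hnd, filter_rank2 ks hnd]
  rcases Bool.eq_false_or_eq_true (ks.contains "block") with c1 | c1 <;>
  rcases Bool.eq_false_or_eq_true (ks.contains "block1") with c2 | c2 <;>
  rcases Bool.eq_false_or_eq_true (ks.contains "iterable") with c3 | c3 <;>
    simp only [c1, c2, c3, if_true, if_false, Bool.false_eq_true,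
      List.append_nil, List.nil_append, List.append_assoc] <;>
    rw [rest_congr ks _
      (by simp [List.contains_eq_mem] at c1 c2 c3; simp [c1, c2, c3])
      (by simp [List.contains_eq_mem] at c1 c2 c3; simp [c1, c2, c3])
      (by simp [List.contains_eq_mem] at c1 c2 c3; simp [c1, c2, c3])
      (by intro k hk
          simp only [List.mem_append, List.mem_singleton, List.mem_cons,
            List.not_mem_nil] at hk
          all_goals tauto)] <;>
    simp [List.append_assoc]

-- ===== VERDICT =====
theorem return_ordered_ext_keys_spec : Claim_equal_return_ordered_ext_keys := by
  unfold Claim_equal_return_ordered_ext_keys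
  intro ext _
  unfold Spec_return_ordered_ext_keys return_ordered_ext_keys return_ordered_ext_keys_alt
  exact main_equality ((PySem.Dict.ofList ext).keys) (PySem.Dict.nodup_keys_ofList _)
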